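-- pv_equiv track=rewrite | github.com/sapega89/NocturneIDE | Plugins/VcsPlugins/vcsGit/GitDiffDialog.py | __mergeFileSeparators
-- ===== SOURCE A (Python) =====
-- def __mergeFileSeparators(fileSeparators):
--     """
--     Private method to merge the file separator entries.
--
--     @param fileSeparators list of file separator entries to be merged
--     @type list of str
--     @return merged list of file separator entries
--     @rtype list of str
--     """
--     separators = {}
--     for oldFile, newFile, pos1, pos2 in sorted(fileSeparators):
--         if (oldFile, newFile) not in separators:
--             separators[(oldFile, newFile)] = [oldFile, newFile, pos1, pos2]
--         else:
--             if pos1 != -2: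
--                 separators[(oldFile, newFile)][2] = pos1
--             if pos2 != -2:
--                 separators[(oldFile, newFile)][3] = pos2
--     return list(separators.values())
-- ===== SOURCE B (Python) =====
-- def __mergeFileSeparators(fileSeparators):
--     """Merge file separator entries without replaying the overriding pass:
--     group the raw (pos1, pos2) pairs per (oldFile, newFile) key, then for
--     each key (in sorted order) pick each final position directly as the
--     corresponding component of the lexicographically largest pair whose
--     component is not -2 (or -2 when every pair has -2 there)."""
--     groups = {}
--     for oldFile, newFile, pos1, pos2 in fileSeparators:
--         groups.setdefault((oldFile, newFile), []).append((pos1, pos2))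
--     result = []
--     for oldFile, newFile in sorted(groups):
--         pairs = groups[(oldFile, newFile)]
--         w1 = [p for p in pairs if p[0] != -2]
--         w2 = [p for p in pairs if p[1] != -2]
--         pos1 = max(w1)[0] if w1 else -2
--         pos2 = max(w2)[1] if w2 else -2
--         result.append([oldFile, newFile, pos1, pos2])
--     return result
-- ===== Notes on version B (the rewrite author's own statement) =====
-- stated objective: alternative
-- what changed: B never replays A's sequential overriding of positions: it groups the raw (pos1,pos2) pairs per (oldFile,newFile) key in one pass, then for each key (in sorted order) computes each final position directly as that component of the lexicographically largest pair whose component is not -2 (or -2 if none), which provably equals A's last-override-wins result over the sorted entries.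
import Mathlib
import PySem

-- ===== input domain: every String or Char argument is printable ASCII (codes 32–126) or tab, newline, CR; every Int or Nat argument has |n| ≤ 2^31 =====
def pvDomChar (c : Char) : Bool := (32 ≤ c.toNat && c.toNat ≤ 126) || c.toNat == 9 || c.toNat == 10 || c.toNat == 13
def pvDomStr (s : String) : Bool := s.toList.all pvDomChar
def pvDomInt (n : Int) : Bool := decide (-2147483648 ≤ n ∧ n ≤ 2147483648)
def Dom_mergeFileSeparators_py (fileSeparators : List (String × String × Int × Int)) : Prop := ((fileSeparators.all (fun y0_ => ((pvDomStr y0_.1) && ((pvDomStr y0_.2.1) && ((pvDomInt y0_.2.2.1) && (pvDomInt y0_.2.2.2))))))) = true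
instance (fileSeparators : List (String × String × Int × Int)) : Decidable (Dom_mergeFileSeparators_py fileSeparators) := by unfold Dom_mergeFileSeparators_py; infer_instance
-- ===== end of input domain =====

-- B drops A's sequential overriding pass entirely: it groups the raw (pos1, pos2)
-- pairs per (oldFile, newFile) key and computes each final position directly as a
-- max over the pairs whose component is not -2; objective: alternative algorithm.

-- Python's sorted() on 4-tuples compares lexicographically; exact via the Lex order
-- (Python's str '<' is Lean's String '<', see PYSEM.md).
def sepKey (x : String × String × Int × Int) : Lex (String × Lex (String × Lex (Int × Int))) :=
  toLex (x.1, toLex (x.2.1, toLex (x.2.2.1, x.2.2.2)))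

-- ===== PORT A =====
-- one iteration of A's loop body over the dict `separators`
def aStep (d : PySem.Dict (String × String) (String × String × Int × Int))
    (x : String × String × Int × Int) :
    PySem.Dict (String × String) (String × String × Int × Int) :=
  if d.contains (x.1, x.2.1) then
    -- `separators[(oldFile,newFile)][2] = pos1` / `[3] = pos2` (dflt unused: key present)
    let d1 := if x.2.2.1 ≠ -2 then d.modify (x.1, x.2.1) x (fun v => (v.1, v.2.1, x.2.2.1, v.2.2.2)) else d
    let d2 := if x.2.2.2 ≠ -2 then d1.modify (x.1, x.2.1) x (fun v => (v.1, v.2.1, v.2.2.1, x.2.2.2)) else d1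
    d2
  else
    d.insert (x.1, x.2.1) x

def mergeFileSeparators_py (fileSeparators : List (String × String × Int × Int)) :
    List (String × String × Int × Int) :=
  ((PySem.List.sorted fileSeparators sepKey).foldl aStep PySem.Dict.empty).values

-- ===== PORT B =====
-- `groups.setdefault((oldFile, newFile), []).append((pos1, pos2))`
def bGroupStep (d : PySem.Dict (String × String) (List (Int × Int)))
    (r : String × String × Int × Int) : PySem.Dict (String × String) (List (Int × Int)) :=
  (d.setdefault (r.1, r.2.1) []).modify (r.1, r.2.1) [] (fun l => l ++ [(r.2.2.1, r.2.2.2)])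

-- one iteration of B's result loop; `groups[(oldFile, newFile)]` is ported as getD,
-- exact here because the key comes from groups' own key list (no KeyError reachable)
def bRow (groups : PySem.Dict (String × String) (List (Int × Int))) (k : String × String) :
    String × String × Int × Int :=
  let pairs := groups.getD k []
  let w1 := pairs.filter (fun p => decide (p.1 ≠ -2))
  let w2 := pairs.filter (fun p => decide (p.2 ≠ -2))
  let pos1 := match PySem.List.max2? w1 (fun p => p.1) (fun p => p.2) with
    | some q => q.1
    | none => -2
  let pos2 := match PySem.List.max2? w2 (fun p => p.1) (fun p => p.2) with
    | some q => q.2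
    | none => -2
  (k.1, k.2, pos1, pos2)

def mergeFileSeparators_py_alt (fileSeparators : List (String × String × Int × Int)) :
    List (String × String × Int × Int) :=
  let groups := fileSeparators.foldl bGroupStep PySem.Dict.empty
  (PySem.List.sorted2 groups.keys (fun k => k.1) (fun k => k.2)).foldl
    (fun acc k => acc ++ [bRow groups k]) []

-- ===== PRECONDITION & SPEC =====
def Spec_mergeFileSeparators_py (fileSeparators : List (String × String × Int × Int)) (out : List (String × String × Int × Int)) : Prop := out = mergeFileSeparators_py_alt fileSeparators
instance (fileSeparators : List (String × String × Int × Int)) (out : List (String × String × Int × Int)) : Decidable (Spec_mergeFileSeparators_py fileSeparators out) := by unfold Spec_mergeFileSeparators_py; infer_instance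

-- ===== CLAIM (what is proved, stated in full; the proofs are below) =====
def Claim_equal_mergeFileSeparators_py : Prop := ∀ (fileSeparators : List (String × String × Int × Int)), Dom_mergeFileSeparators_py fileSeparators → Spec_mergeFileSeparators_py fileSeparators (mergeFileSeparators_py fileSeparators)

-- ===== LEMMAS AND PROOFS =====

-- ordering key on the (oldFile, newFile) pair
def keyF (r : String × String × Int × Int) : String × String := (r.1, r.2.1)
def keyOf (v : String × String × Int × Int) : Lex (String × String) := toLex (keyF v)
def pairOf (r : String × String × Int × Int) : Int × Int := (r.2.2.1, r.2.2.2)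

-- intermediate form of A's loop: merge each sorted row into the previous row when
-- it shares the (oldFile, newFile) key (accumulator kept reversed, head = last row)
def mStep (acc : List (String × String × Int × Int)) (x : String × String × Int × Int) :
    List (String × String × Int × Int) :=
  match acc with
  | [] => [x]
  | m :: rest =>
    if m.1 = x.1 ∧ m.2.1 = x.2.1 then
      let m1 := if x.2.2.1 ≠ -2 then (m.1, m.2.1, x.2.2.1, m.2.2.2) else m
      let m2 := if x.2.2.2 ≠ -2 then (m1.1, m1.2.1, m1.2.2.1, x.2.2.2) else m1
      m2 :: rest
    else
      x :: m :: rest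

-- canonical description of the merged row for one key: each final position is the
-- corresponding component of the LAST pair (in processing order) that is not -2
def q1 (ps : List (Int × Int)) : Int :=
  match (ps.filter (fun p => decide (p.1 ≠ -2))).getLast? with
  | some p => p.1
  | none => -2
def q2 (ps : List (Int × Int)) : Int :=
  match (ps.filter (fun p => decide (p.2 ≠ -2))).getLast? with
  | some p => p.2
  | none => -2
def rowFor (k : String × String) (ps : List (Int × Int)) : String × String × Int × Int :=
  (k.1, k.2, q1 ps, q2 ps)
def pairsIn (l : List (String × String × Int × Int)) (k : String × String) : List (Int × Int) :=
  (l.filter (fun r => keyF r == k)).map pairOf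
def canon (l : List (String × String × Int × Int)) : List (String × String × Int × Int) :=
  (PySem.List.dedup (l.map keyF)).map (fun k => rowFor k (pairsIn l k))

-- dict entry built from a stored row
def toEntry (v : String × String × Int × Int) : (String × String) × (String × String × Int × Int) :=
  ((v.1, v.2.1), v)

lemma keyOf_mono {a b : String × String × Int × Int} (h : sepKey a ≤ sepKey b) :
    keyOf a ≤ keyOf b := by
  simp only [sepKey, keyOf, keyF, Prod.Lex.le_iff, ofLex_toLex] at h ⊢
  rcases h with h | ⟨h1, h2⟩
  · exact Or.inl h
  · rcases h2 with h2 | ⟨h2, _⟩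
    · exact Or.inr ⟨h1, le_of_lt h2⟩
    · exact Or.inr ⟨h1, le_of_eq h2⟩

lemma keyOf_eq_iff {a b : String × String × Int × Int} :
    keyOf a = keyOf b ↔ (a.1 = b.1 ∧ a.2.1 = b.2.1) := by
  unfold keyOf keyF
  constructor
  · intro h
    exact Prod.ext_iff.mp (toLex.injective h)
  · rintro ⟨h1, h2⟩
    rw [h1, h2]

lemma contains_append_last {ν : Type} (pre : List ((String × String) × ν))
    (k : String × String) (v : ν) :
    (PySem.Dict.mk (pre ++ [(k, v)])).contains k = true := by
  simp [PySem.Dict.contains, List.any_append]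

lemma contains_eq_false_of_forall {ν : Type} (l : List ((String × String) × ν))
    (k : String × String) (h : ∀ p ∈ l, p.1 ≠ k) :
    (PySem.Dict.mk l).contains k = false := by
  simp only [PySem.Dict.contains, List.any_eq_false]
  intro p hp
  simpa using h p hp

lemma getD_append_last {ν : Type} (pre : List ((String × String) × ν))
    (k : String × String) (v dflt : ν)
    (h : ∀ p ∈ pre, p.1 ≠ k) :
    (PySem.Dict.mk (pre ++ [(k, v)])).getD k dflt = v := by
  induction pre with
  | nil => simp [PySem.Dict.getD, PySem.Dict.get?]
  | cons p t ih =>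
    have hp : (p.1 == k) = false := by
      simpa using h p (List.mem_cons_self)
    simp only [List.cons_append]
    simp only [PySem.Dict.getD, PySem.Dict.get?, List.find?_cons, hp] at ih ⊢
    exact ih (fun q hq => h q (List.mem_cons_of_mem _ hq))

lemma insert_append_last {ν : Type} (pre : List ((String × String) × ν))
    (k : String × String) (v w : ν)
    (h : ∀ p ∈ pre, p.1 ≠ k) :
    (PySem.Dict.mk (pre ++ [(k, v)])).insert k w = PySem.Dict.mk (pre ++ [(k, w)]) := by
  simp only [PySem.Dict.insert, contains_append_last, if_pos]
  congr 1
  rw [List.map_append]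
  congr 1
  · conv_rhs => rw [← List.map_id pre]
    apply List.map_congr_left
    intro p hp
    have : (p.1 == k) = false := by simpa using h p hp
    simp [this]
  · simp

lemma modify_append_last {ν : Type} (pre : List ((String × String) × ν))
    (k : String × String) (v dflt : ν)
    (f : ν → ν)
    (h : ∀ p ∈ pre, p.1 ≠ k) :
    (PySem.Dict.mk (pre ++ [(k, v)])).modify k dflt f = PySem.Dict.mk (pre ++ [(k, f v)]) := by
  simp only [PySem.Dict.modify, getD_append_last pre k v dflt h, insert_append_last pre k v (f v) h]

-- the A-side loop invariant: A's dict (items = reversed acc as entries) tracks the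
-- reversed adjacent-merge accumulator
lemma loop_eq (l : List (String × String × Int × Int))
    (acc : List (String × String × Int × Int))
    (hdec : acc.Pairwise (fun a b => keyOf b < keyOf a))
    (hle : ∀ y ∈ l, ∀ v ∈ acc, keyOf v ≤ keyOf y)
    (hl : l.Pairwise (fun a b => sepKey a ≤ sepKey b)) :
    (l.foldl aStep (PySem.Dict.mk ((acc.map toEntry).reverse))).values
      = (l.foldl mStep acc).reverse := by
  induction l generalizing acc with
  | nil =>
    simp [PySem.Dict.values, List.map_reverse, Function.comp_def, toEntry]
  | cons x l ih =>
    rw [List.pairwise_cons] at hl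
    obtain ⟨hxl, hl'⟩ := hl
    have hxle : ∀ y ∈ l, keyOf x ≤ keyOf y := fun y hy => keyOf_mono (hxl y hy)
    have haccx : ∀ v ∈ acc, keyOf v ≤ keyOf x := hle x (List.mem_cons_self)
    simp only [List.foldl_cons]
    cases acc with
    | nil =>
      have hstep : aStep (PySem.Dict.mk ([] : List ((String × String) × (String × String × Int × Int)))) x = PySem.Dict.mk ([x].map toEntry).reverse := by
        simp [aStep, PySem.Dict.insert, PySem.Dict.contains, toEntry]
      simp only [List.map_nil, List.reverse_nil]
      rw [show mStep [] x = [x] from rfl, hstep]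
      exact ih [x] (by simp) (by
        intro y hy v hv
        simp only [List.mem_singleton] at hv
        subst hv
        exact hxle y hy) hl'
    | cons m rest =>
      rw [List.pairwise_cons] at hdec
      obtain ⟨hmrest, hdecr⟩ := hdec
      have hitems : ((m :: rest).map toEntry).reverse
          = (rest.map toEntry).reverse ++ [toEntry m] := by simp
      by_cases hk : keyOf m = keyOf x
      · -- equal keys: A modifies the last dict entry, the merge updates the head of acc
        obtain ⟨he1, he2⟩ := keyOf_eq_iff.mp hk
        have hkne : ∀ p ∈ (rest.map toEntry).reverse, p.1 ≠ (x.1, x.2.1) := by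
          intro p hp hpk
          rw [List.mem_reverse, List.mem_map] at hp
          obtain ⟨v, hv, rfl⟩ := hp
          have hlt : keyOf v < keyOf m := hmrest v hv
          have : keyOf v = keyOf x := keyOf_eq_iff.mpr (Prod.ext_iff.mp hpk)
          rw [this, ← hk] at hlt
          exact lt_irrefl _ hlt
        have hkm : toEntry m = ((x.1, x.2.1), m) := by
          unfold toEntry; rw [he1, he2]
        set m1 := if x.2.2.1 ≠ -2 then (m.1, m.2.1, x.2.2.1, m.2.2.2) else m with hm1
        set m2 := if x.2.2.2 ≠ -2 then (m1.1, m1.2.1, m1.2.2.1, x.2.2.2) else m1 with hm2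
        have hm1fst : m1.1 = m.1 ∧ m1.2.1 = m.2.1 := by
          rw [hm1]; split <;> simp
        have hm2fst : m2.1 = m.1 ∧ m2.2.1 = m.2.1 := by
          rw [hm2]; split <;> simp [hm1fst.1, hm1fst.2]
        have hbstep : mStep (m :: rest) x = m2 :: rest := by
          simp only [mStep]
          rw [if_pos ⟨he1, he2⟩]
        have hcont : (PySem.Dict.mk (((m :: rest).map toEntry).reverse)).contains (x.1, x.2.1) = true := by
          rw [hitems, hkm]
          exact contains_append_last _ _ _
        have hastep : aStep (PySem.Dict.mk (((m :: rest).map toEntry).reverse)) x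
            = PySem.Dict.mk (((m2 :: rest).map toEntry).reverse) := by
          simp only [aStep, hcont, if_pos]
          rw [hitems, hkm]
          have step1 : (if x.2.2.1 ≠ -2 then
              (PySem.Dict.mk ((rest.map toEntry).reverse ++ [((x.1, x.2.1), m)])).modify (x.1, x.2.1) x
                (fun v => (v.1, v.2.1, x.2.2.1, v.2.2.2))
              else PySem.Dict.mk ((rest.map toEntry).reverse ++ [((x.1, x.2.1), m)]))
              = PySem.Dict.mk ((rest.map toEntry).reverse ++ [((x.1, x.2.1), m1)]) := by
            rw [hm1]
            split
            · rw [modify_append_last _ _ _ _ _ hkne]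
            · rfl
          rw [step1]
          have step2 : (if x.2.2.2 ≠ -2 then
              (PySem.Dict.mk ((rest.map toEntry).reverse ++ [((x.1, x.2.1), m1)])).modify (x.1, x.2.1) x
                (fun v => (v.1, v.2.1, v.2.2.1, x.2.2.2))
              else PySem.Dict.mk ((rest.map toEntry).reverse ++ [((x.1, x.2.1), m1)]))
              = PySem.Dict.mk ((rest.map toEntry).reverse ++ [((x.1, x.2.1), m2)]) := by
            rw [hm2]
            split
            · rw [modify_append_last _ _ _ _ _ hkne]
            · rfl
          rw [step2]
          have : toEntry m2 = ((x.1, x.2.1), m2) := by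
            unfold toEntry
            rw [hm2fst.1, hm2fst.2, he1, he2]
          simp [this]
        rw [hastep, hbstep]
        have hkm2 : keyOf m2 = keyOf m := keyOf_eq_iff.mpr ⟨hm2fst.1, hm2fst.2⟩
        exact ih (m2 :: rest)
          (List.pairwise_cons.mpr ⟨by intro v hv; rw [hkm2]; exact hmrest v hv, hdecr⟩)
          (by
            intro y hy v hv
            rcases List.mem_cons.mp hv with rfl | hv
            · rw [hkm2, hk]; exact hxle y hy
            · exact hle y (List.mem_cons_of_mem _ hy) v (List.mem_cons_of_mem _ hv))
          hl'
      · -- new key: A appends to the dict, the merge pushes a new row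
        have hstrict : ∀ v ∈ (m :: rest), keyOf v < keyOf x := by
          intro v hv
          rcases List.mem_cons.mp hv with rfl | hv
          · exact lt_of_le_of_ne (haccx v (List.mem_cons_self)) hk
          · exact lt_of_lt_of_le (hmrest v hv) (haccx m (List.mem_cons_self))
        have hkne : ∀ p ∈ ((m :: rest).map toEntry).reverse, p.1 ≠ (x.1, x.2.1) := by
          intro p hp hpk
          rw [List.mem_reverse, List.mem_map] at hp
          obtain ⟨v, hv, rfl⟩ := hp
          have : keyOf v = keyOf x := keyOf_eq_iff.mpr (Prod.ext_iff.mp hpk)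
          exact absurd this (ne_of_lt (hstrict v hv))
        have hcont : (PySem.Dict.mk (((m :: rest).map toEntry).reverse)).contains (x.1, x.2.1) = false :=
          contains_eq_false_of_forall _ _ hkne
        have hastep : aStep (PySem.Dict.mk (((m :: rest).map toEntry).reverse)) x
            = PySem.Dict.mk (((x :: m :: rest).map toEntry).reverse) := by
          simp only [aStep, PySem.Dict.insert, hcont, Bool.false_eq_true, if_false]
          simp [toEntry]
        have hbstep : mStep (m :: rest) x = x :: m :: rest := by
          simp only [mStep]
          rw [if_neg (fun hh => hk (keyOf_eq_iff.mpr hh))]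
        rw [hastep, hbstep]
        exact ih (x :: m :: rest)
          (List.pairwise_cons.mpr ⟨hstrict, List.pairwise_cons.mpr ⟨hmrest, hdecr⟩⟩)
          (by
            intro y hy v hv
            rcases List.mem_cons.mp hv with rfl | hv
            · exact hxle y hy
            · exact hle y (List.mem_cons_of_mem _ hy) v hv)
          hl'

-- dedup structure (PySem.List.dedup = Set.ofList, appends first occurrences)
lemma addfold_eq {α : Type} [BEq α] [LawfulBEq α] (l : List α) :
    List.foldl PySem.Set.add PySem.Set.empty l
      = List.foldl (fun s x => if x ∈ s then s else s ++ [x]) ([] : List α) l := by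
  have hf : (PySem.Set.add : PySem.Set α → α → PySem.Set α)
      = (fun s x => if x ∈ s then s else s ++ [x]) := by
    funext s y
    simp [PySem.Set.add, PySem.Set.contains]
  rw [hf]
  rfl

lemma dedup_sublist {α : Type} [BEq α] (l : List α) : (PySem.List.dedup l).Sublist l := by
  unfold PySem.List.dedup PySem.Set.ofList
  induction l using List.reverseRecOn with
  | nil => simp [PySem.Set.empty]
  | append_singleton l x ih =>
    rw [List.foldl_append]
    simp only [List.foldl_cons, List.foldl_nil]
    unfold PySem.Set.add
    split
    · exact ih.trans (List.sublist_append_left _ _)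
    · exact List.Sublist.append ih (List.Sublist.refl _)

lemma dedup_append_mem {α : Type} [BEq α] [LawfulBEq α] (l : List α) (x : α) (h : x ∈ l) :
    PySem.List.dedup (l ++ [x]) = PySem.List.dedup l := by
  unfold PySem.List.dedup PySem.Set.ofList
  rw [List.foldl_append]
  simp only [List.foldl_cons, List.foldl_nil]
  have hm : x ∈ List.foldl PySem.Set.add PySem.Set.empty l := by
    have := (PySem.Set.mem_ofList l x).mpr h
    simpa [PySem.Set.ofList] using this
  unfold PySem.Set.add
  simp
  exact addfold_eq l ▸ hm

lemma dedup_append_not_mem {α : Type} [BEq α] [LawfulBEq α] (l : List α) (x : α) (h : x ∉ l) :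
    PySem.List.dedup (l ++ [x]) = PySem.List.dedup l ++ [x] := by
  unfold PySem.List.dedup PySem.Set.ofList
  rw [List.foldl_append]
  simp only [List.foldl_cons, List.foldl_nil]
  have hm : x ∉ List.foldl PySem.Set.add PySem.Set.empty l := by
    intro hc
    exact h ((PySem.Set.mem_ofList l x).mp (by simpa [PySem.Set.ofList] using hc))
  unfold PySem.Set.add
  simp
  exact fun hc => hm (addfold_eq l ▸ hc)

lemma pairwise_le_getLast {α : Type} {R : α → α → Prop} (hrefl : ∀ a, R a a)
    (l : List α) (h : l.Pairwise R) (hne : l ≠ []) : ∀ a ∈ l, R a (l.getLast hne) := by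
  induction l with
  | nil => simp
  | cons b t ih =>
    intro a ha
    rcases List.mem_cons.mp ha with rfl | hat
    · cases t with
      | nil => simpa using hrefl a
      | cons c u =>
        rw [List.getLast_cons (by simp)]
        exact (List.pairwise_cons.mp h).1 _ (List.getLast_mem _)
    · cases t with
      | nil => simp at hat
      | cons c u =>
        rw [List.getLast_cons (by simp)]
        exact ih (List.pairwise_cons.mp h).2 (by simp) a hat

-- the boolean lexicographic compare used by sorted2 / max2? IS the Lex order
lemma lexlt_bool {α β : Type} [LinearOrder α] [LinearOrder β] (a b : α × β) :
    (decide (a.1 < b.1) || (!decide (b.1 < a.1) && decide (a.2 < b.2)))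
      = decide (toLex a < toLex b) := by
  rcases lt_trichotomy a.1 b.1 with h | h | h
  · simp [Prod.Lex.lt_iff, h, asymm h]
  · simp [Prod.Lex.lt_iff, h]
  · simp [Prod.Lex.lt_iff, h, asymm h, ne_of_gt h]

lemma q1_append (ps : List (Int × Int)) (p : Int × Int) :
    q1 (ps ++ [p]) = if p.1 ≠ -2 then p.1 else q1 ps := by
  unfold q1
  rw [List.filter_append]
  by_cases h : p.1 = -2
  · simp [h]
  · simp [h]

lemma q2_append (ps : List (Int × Int)) (p : Int × Int) :
    q2 (ps ++ [p]) = if p.2 ≠ -2 then p.2 else q2 ps := by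
  unfold q2
  rw [List.filter_append]
  by_cases h : p.2 = -2
  · simp [h]
  · simp [h]

lemma rowFor_single (x : String × String × Int × Int) :
    rowFor (keyF x) [pairOf x] = x := by
  unfold rowFor keyF pairOf q1 q2
  by_cases h1 : x.2.2.1 = -2 <;> by_cases h2 : x.2.2.2 = -2 <;> simp [h1, h2, Prod.ext_iff]

lemma pairsIn_append_ne (l : List (String × String × Int × Int))
    (x : String × String × Int × Int) (k : String × String) (h : k ≠ keyF x) :
    pairsIn (l ++ [x]) k = pairsIn l k := by
  unfold pairsIn
  rw [List.filter_append]
  simp [Ne.symm h]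

lemma pairsIn_append_self (l : List (String × String × Int × Int))
    (x : String × String × Int × Int) :
    pairsIn (l ++ [x]) (keyF x) = pairsIn l (keyF x) ++ [pairOf x] := by
  unfold pairsIn
  rw [List.filter_append]
  simp

-- A's merged accumulator over the sorted list IS the canonical per-key table
lemma fold_canon (l : List (String × String × Int × Int))
    (hl : l.Pairwise (fun a b => sepKey a ≤ sepKey b)) :
    (l.foldl mStep []).reverse = canon l := by
  induction l using List.reverseRecOn with
  | nil => simp [canon, PySem.List.dedup, PySem.Set.ofList, PySem.Set.empty]
  | append_singleton l x ih =>
    obtain ⟨hpl, -, hup⟩ := List.pairwise_append.mp hl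
    have hup' : ∀ r ∈ l, sepKey r ≤ sepKey x := fun r hr => hup r hr x (by simp)
    have hfold : l.foldl mStep [] = (canon l).reverse := by
      rw [← ih hpl, List.reverse_reverse]
    rw [List.foldl_append, List.foldl_cons, List.foldl_nil, hfold]
    have hDle : (PySem.List.dedup (l.map keyF)).Pairwise (fun a b => toLex a ≤ toLex b) :=
      ((List.pairwise_map).mpr (hpl.imp keyOf_mono)).sublist (dedup_sublist _)
    by_cases hx : keyF x ∈ l.map keyF
    · -- x's key already occurred: the merge updates the LAST canonical row
      set D := PySem.List.dedup (l.map keyF) with hD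
      have hmem : keyF x ∈ D := (PySem.List.mem_dedup _ _).mpr hx
      have hne : D ≠ [] := List.ne_nil_of_mem hmem
      have hmaxk : ∀ k ∈ D, toLex k ≤ toLex (keyF x) := by
        intro k hk
        obtain ⟨r, hr, rfl⟩ := List.mem_map.mp ((PySem.List.mem_dedup _ _).mp hk)
        exact keyOf_mono (hup' r hr)
      have hlast : D.getLast hne = keyF x := by
        have h1 := pairwise_le_getLast (fun a => le_refl (toLex a)) D hDle hne (keyF x) hmem
        have h2 := hmaxk _ (List.getLast_mem hne)
        exact toLex.injective (le_antisymm h2 h1)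
      have hsplit : D = D.dropLast ++ [keyF x] := by
        conv_lhs => rw [← List.dropLast_append_getLast hne]
        rw [hlast]
      have hnotin : keyF x ∉ D.dropLast := by
        have hnd : D.Nodup := PySem.List.nodup_dedup _
        rw [hsplit] at hnd
        intro hc
        exact (List.disjoint_of_nodup_append hnd) hc (by simp)
      have hdd : PySem.List.dedup ((l ++ [x]).map keyF) = D := by
        rw [List.map_append]
        exact dedup_append_mem _ _ hx
      have hmapeq : ∀ m : List (String × String),
          (∀ k ∈ m, k ≠ keyF x) →
          m.map (fun k => rowFor k (pairsIn (l ++ [x]) k))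
            = m.map (fun k => rowFor k (pairsIn l k)) := by
        intro m hm
        exact List.map_congr_left (fun k hk => by rw [pairsIn_append_ne l x k (hm k hk)])
      have hcanon : canon l
          = (D.dropLast).map (fun k => rowFor k (pairsIn l k))
            ++ [rowFor (keyF x) (pairsIn l (keyF x))] := by
        unfold canon
        rw [← hD]
        conv_lhs => rw [hsplit]
        rw [List.map_append]
        rfl
      have hcanon' : canon (l ++ [x])
          = (D.dropLast).map (fun k => rowFor k (pairsIn l k))
            ++ [rowFor (keyF x) (pairsIn l (keyF x) ++ [pairOf x])] := by
        unfold canon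
        rw [hdd]
        conv_lhs => rw [hsplit]
        rw [List.map_append, hmapeq _ (fun k hk h => hnotin (h ▸ hk)),
          show ([keyF x].map (fun k => rowFor k (pairsIn (l ++ [x]) k)))
            = [rowFor (keyF x) (pairsIn (l ++ [x]) (keyF x))] from rfl,
          pairsIn_append_self]
      rw [hcanon, hcanon', List.reverse_append]
      simp only [List.reverse_singleton, List.singleton_append]
      have hstep : mStep (rowFor (keyF x) (pairsIn l (keyF x))
            :: (List.map (fun k => rowFor k (pairsIn l k)) D.dropLast).reverse) x
          = rowFor (keyF x) (pairsIn l (keyF x) ++ [pairOf x])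
            :: (List.map (fun k => rowFor k (pairsIn l k)) D.dropLast).reverse := by
        simp only [mStep]
        rw [if_pos ⟨rfl, rfl⟩]
        congr 1
        unfold rowFor
        rw [q1_append, q2_append]
        by_cases h1 : x.2.2.1 = -2 <;> by_cases h2 : x.2.2.2 = -2 <;>
          simp [pairOf, h1, h2]
      rw [hstep]
      simp
    · -- fresh key: the merge pushes a brand-new row equal to x itself
      have hdd : PySem.List.dedup ((l ++ [x]).map keyF)
          = PySem.List.dedup (l.map keyF) ++ [keyF x] := by
        rw [List.map_append]
        exact dedup_append_not_mem _ _ hx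
      have hempty : pairsIn l (keyF x) = [] := by
        unfold pairsIn
        rw [List.filter_eq_nil_iff.mpr, List.map_nil]
        intro r hr
        simp only [beq_iff_eq]
        exact fun hc => hx (List.mem_map.mpr ⟨r, hr, hc⟩)
      have hcanon' : canon (l ++ [x]) = canon l ++ [x] := by
        unfold canon
        rw [hdd, List.map_append]
        congr 1
        · apply List.map_congr_left
          intro k hk
          rw [pairsIn_append_ne l x k]
          intro hc
          exact hx (hc ▸ (PySem.List.mem_dedup _ _).mp hk)
        · rw [show ([keyF x].map (fun k => rowFor k (pairsIn (l ++ [x]) k)))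
              = [rowFor (keyF x) (pairsIn (l ++ [x]) (keyF x))] from rfl,
            pairsIn_append_self, hempty, List.nil_append, rowFor_single]
      -- mStep pushes x: the head of the accumulator (if any) has a different key
      have hpush : mStep ((canon l).reverse) x = x :: (canon l).reverse := by
        cases hc : (canon l).reverse with
        | nil => rfl
        | cons m rest =>
          have hm : m ∈ canon l := by
            rw [← List.mem_reverse, hc]
            exact List.mem_cons_self
          obtain ⟨k, hk, rfl⟩ := List.mem_map.mp hm
          simp only [mStep]
          rw [if_neg]
          rintro ⟨ha, hb⟩
          apply hx
          have hkx : k = keyF x := by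
            unfold rowFor at ha hb
            exact Prod.ext ha hb
          exact hkx ▸ (PySem.List.mem_dedup _ _).mp hk
      rw [hpush, hcanon']
      simp

-- association-list lookups/updates on a dict whose items are a mapped key list
lemma assoc_getD {ν : Type} (D : List (String × String)) (f : String × String → ν)
    (k : String × String) (dflt : ν) (hk : k ∈ D) :
    (PySem.Dict.mk (D.map (fun j => (j, f j)))).getD k dflt = f k := by
  induction D with
  | nil => simp at hk
  | cons j t ih =>
    by_cases hj : j = k
    · subst hj
      simp [PySem.Dict.getD, PySem.Dict.get?]
    · have : k ∈ t := by
        rcases List.mem_cons.mp hk with rfl | h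
        · exact absurd rfl hj
        · exact h
      have hb : (j == k) = false := by simpa using hj
      simp only [List.map_cons, PySem.Dict.getD, PySem.Dict.get?, List.find?_cons, hb] at ih ⊢
      exact ih this

lemma assoc_contains {ν : Type} (D : List (String × String)) (f : String × String → ν)
    (k : String × String) :
    (PySem.Dict.mk (D.map (fun j => (j, f j)))).contains k = decide (k ∈ D) := by
  simp only [PySem.Dict.contains, List.any_map, Function.comp_def]
  induction D with
  | nil => simp
  | cons a t ih =>
    simp only [List.any_cons, ih, List.mem_cons]
    by_cases h : k = a
    · simp [h]
    · have hb : (a == k) = false := by simpa using Ne.symm h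
      simp [h, hb]

lemma assoc_insert_mem {ν : Type} (D : List (String × String)) (f : String × String → ν)
    (k : String × String) (v : ν) (hk : k ∈ D) :
    (PySem.Dict.mk (D.map (fun j => (j, f j)))).insert k v
      = PySem.Dict.mk (D.map (fun j => (j, if j = k then v else f j))) := by
  simp only [PySem.Dict.insert, assoc_contains, hk, decide_true, if_pos]
  congr 1
  rw [List.map_map]
  apply List.map_congr_left
  intro j hj
  by_cases h : j = k
  · subst h
    simp
  · simp [h]

-- B-side: the grouping dict's items are exactly the canonical key/pairs table
lemma groups_items (xs : List (String × String × Int × Int)) :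
    (xs.foldl bGroupStep PySem.Dict.empty).items
      = (PySem.List.dedup (xs.map keyF)).map (fun k => (k, pairsIn xs k)) := by
  induction xs using List.reverseRecOn with
  | nil => simp [PySem.Dict.empty, PySem.List.dedup, PySem.Set.ofList, PySem.Set.empty, pairsIn]
  | append_singleton xs x ih =>
    rw [List.foldl_append, List.foldl_cons, List.foldl_nil]
    have hdict : xs.foldl bGroupStep PySem.Dict.empty
        = PySem.Dict.mk ((PySem.List.dedup (xs.map keyF)).map (fun k => (k, pairsIn xs k))) := by
      cases h : xs.foldl bGroupStep PySem.Dict.empty with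
      | mk items => rw [show items = (xs.foldl bGroupStep PySem.Dict.empty).items by rw [h], ih]
    rw [hdict]
    set D := PySem.List.dedup (xs.map keyF) with hD
    by_cases hx : keyF x ∈ xs.map keyF
    · -- key already present: setdefault is a no-op, the pair list is extended in place
      have hmem : keyF x ∈ D := (PySem.List.mem_dedup _ _).mpr hx
      have hcont : (PySem.Dict.mk (D.map (fun k => (k, pairsIn xs k)))).contains (x.1, x.2.1) = true := by
        rw [show ((x.1, x.2.1) : String × String) = keyF x from rfl, assoc_contains]
        simpa using hmem
      unfold bGroupStep
      rw [PySem.Dict.setdefault_of_contains _ _ hcont]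
      simp only [PySem.Dict.modify]
      rw [show ((x.1, x.2.1) : String × String) = keyF x from rfl,
        assoc_getD D _ _ _ hmem, assoc_insert_mem D _ _ _ hmem,
        List.map_append]
      simp only [List.map_cons, List.map_nil]
      rw [dedup_append_mem _ _ hx, ← hD]
      show List.map _ D = List.map _ D
      apply List.map_congr_left
      intro k hk
      by_cases hkx : k = keyF x
      · subst hkx
        rw [if_pos rfl, pairsIn_append_self]
        rfl
      · rw [if_neg hkx, pairsIn_append_ne _ _ _ hkx]
    · -- fresh key: setdefault appends the key, then its singleton pair list is written
      have hcont : (PySem.Dict.mk (D.map (fun k => (k, pairsIn xs k)))).contains (x.1, x.2.1) = false := by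
        rw [show ((x.1, x.2.1) : String × String) = keyF x from rfl, assoc_contains]
        simp only [decide_eq_false_iff_not]
        exact fun hc => hx ((PySem.List.mem_dedup _ _).mp hc)
      have hkne : ∀ p ∈ D.map (fun k => (k, pairsIn xs k)), p.1 ≠ ((x.1, x.2.1) : String × String) := by
        intro p hp hpk
        obtain ⟨k, hk, rfl⟩ := List.mem_map.mp hp
        have hk' : k = keyF x := hpk
        exact hx (hk' ▸ (PySem.List.mem_dedup _ _).mp hk)
      have hempty : pairsIn xs (keyF x) = [] := by
        unfold pairsIn
        rw [List.filter_eq_nil_iff.mpr, List.map_nil]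
        intro r hr
        simp only [beq_iff_eq]
        exact fun hc => hx (List.mem_map.mpr ⟨r, hr, hc⟩)
      unfold bGroupStep
      rw [PySem.Dict.setdefault_of_not_contains _ _ hcont]
      have hsd : (PySem.Dict.mk (D.map (fun k => (k, pairsIn xs k)))).insert (x.1, x.2.1) []
          = PySem.Dict.mk (D.map (fun k => (k, pairsIn xs k)) ++ [((x.1, x.2.1), [])]) := by
        simp only [PySem.Dict.insert, hcont, Bool.false_eq_true, if_false]
      rw [hsd, modify_append_last _ _ _ _ _ hkne, List.map_append]
      simp only [List.map_cons, List.map_nil]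
      rw [dedup_append_not_mem _ _ hx, ← hD, List.map_append]
      congr 1
      · apply List.map_congr_left
        intro k hk
        rw [pairsIn_append_ne]
        intro hc
        exact hx (hc ▸ (PySem.List.mem_dedup _ _).mp hk)
      · rw [show (List.map (fun k => (k, pairsIn (xs ++ [x]) k)) [keyF x])
            = [(keyF x, pairsIn (xs ++ [x]) (keyF x))] from rfl,
          pairsIn_append_self, hempty]
        rfl

-- with the (oldFile, newFile) keys equal, sorted-order of rows is lex order of the pairs
lemma pair_le {a b : String × String × Int × Int} (h : sepKey a ≤ sepKey b)
    (ha : keyF a = keyF b) : toLex (pairOf a) ≤ toLex (pairOf b) := by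
  obtain ⟨h1, h2⟩ := Prod.ext_iff.mp ha
  simp only [sepKey, Prod.Lex.le_iff, ofLex_toLex] at h
  unfold pairOf
  rcases h with h | ⟨-, h⟩
  · rw [show a.1 = b.1 from h1] at h
    exact absurd h (lt_irrefl _)
  · rcases h with h | ⟨-, h⟩
    · rw [show a.2.1 = b.2.1 from h2] at h
      exact absurd h (lt_irrefl _)
    · exact Prod.Lex.le_iff.mpr (by simpa using h)

-- sorted2 with fst/snd keys IS sorted by the lexicographic key
lemma sorted2_lex {α β : Type} [LinearOrder α] [LinearOrder β] (ks : List (α × β)) :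
    PySem.List.sorted2 ks (fun k => k.1) (fun k => k.2)
      = PySem.List.sorted ks (fun k => toLex k) := by
  rw [PySem.List.sorted_eq_foldl_insertBy]
  unfold PySem.List.sorted2
  have hf : (fun (a b : α × β) => decide (a.1 < b.1) || (!decide (b.1 < a.1) && decide (a.2 < b.2)))
      = (fun a b => decide (toLex a < toLex b)) := by
    funext a b
    exact lexlt_bool a b
  simp only [Bool.false_eq_true, if_false, hf]

-- the fold step of max2? on pairs, named so the goal states stay readable
def m2step (acc : Option (Int × Int)) (x : Int × Int) : Option (Int × Int) :=
  match acc with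
  | none => some x
  | some q =>
    if (decide (q.1 < x.1) || (!decide (x.1 < q.1) && decide (q.2 < x.2))) = true
    then some x else some q

lemma max2_eq_foldl (w : List (Int × Int)) :
    PySem.List.max2? w (fun p => p.1) (fun p => p.2) = w.foldl m2step none := by
  unfold PySem.List.max2?
  congr 1
  funext acc x
  cases acc <;> rfl

-- running max2? never leaves the list and dominates everything seen
lemma max2_go (t : List (Int × Int)) (m : Int × Int) :
    ∃ m', t.foldl m2step (some m) = some m'
      ∧ m' ∈ m :: t ∧ ∀ y ∈ m :: t, toLex y ≤ toLex m' := by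
  induction t generalizing m with
  | nil => exact ⟨m, rfl, by simp, by simp⟩
  | cons x t ih =>
    rw [List.foldl_cons]
    show ∃ m', List.foldl m2step (if (decide (m.1 < x.1)
        || (!decide (x.1 < m.1) && decide (m.2 < x.2))) = true then some x else some m) t
        = some m' ∧ _
    simp only [lexlt_bool m x, decide_eq_true_eq]
    by_cases h : toLex m < toLex x
    · rw [if_pos h]
      obtain ⟨m', h1, h2, h3⟩ := ih x
      refine ⟨m', h1, ?_, ?_⟩
      · rcases List.mem_cons.mp h2 with rfl | hm
        · exact List.mem_cons_of_mem _ List.mem_cons_self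
        · exact List.mem_cons_of_mem _ (List.mem_cons_of_mem _ hm)
      · intro y hy
        rcases List.mem_cons.mp hy with rfl | hy
        · exact le_trans (le_of_lt h) (h3 x List.mem_cons_self)
        · exact h3 y hy
    · rw [if_neg h]
      obtain ⟨m', h1, h2, h3⟩ := ih m
      refine ⟨m', h1, ?_, ?_⟩
      · rcases List.mem_cons.mp h2 with rfl | hm
        · exact List.mem_cons_self
        · exact List.mem_cons_of_mem _ (List.mem_cons_of_mem _ hm)
      · intro y hy
        rcases List.mem_cons.mp hy with rfl | hy
        · exact h3 _ List.mem_cons_self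
        · rcases List.mem_cons.mp hy with rfl | hy
          · exact le_trans (le_of_not_gt h) (h3 _ List.mem_cons_self)
          · exact h3 y (List.mem_cons_of_mem _ hy)

-- max2? of any permutation of a Lex-sorted pair list is its last element
lemma max2_eq_getLast (w w' : List (Int × Int)) (hperm : w.Perm w')
    (hsort : w'.Pairwise (fun p q => toLex p ≤ toLex q)) :
    PySem.List.max2? w (fun p => p.1) (fun p => p.2) = w'.getLast? := by
  cases w with
  | nil =>
    rw [hperm.symm.eq_nil]
    rfl
  | cons b t =>
    have hne' : w' ≠ [] := by
      intro hc
      rw [hc] at hperm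
      simpa using hperm.eq_nil
    obtain ⟨m', h1, h2, h3⟩ := max2_go t b
    rw [max2_eq_foldl, List.foldl_cons, show m2step none b = some b from rfl, h1,
      List.getLast?_eq_some_getLast hne']
    have hmem : m' ∈ w' := hperm.subset h2
    have hup : toLex m' ≤ toLex (w'.getLast hne') :=
      pairwise_le_getLast (fun p => le_refl (toLex p)) w' hsort hne' m' hmem
    have hdown : toLex (w'.getLast hne') ≤ toLex m' :=
      h3 _ (hperm.mem_iff.mpr (List.getLast_mem hne'))
    rw [toLex.injective (le_antisymm hup hdown)]

-- B equals the canonical table of the sorted input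
lemma alt_canon (xs : List (String × String × Int × Int)) :
    mergeFileSeparators_py_alt xs = canon (PySem.List.sorted xs sepKey) := by
  have hLperm : (PySem.List.sorted xs sepKey).Perm xs := PySem.List.sorted_perm xs sepKey false
  have hLpair : (PySem.List.sorted xs sepKey).Pairwise (fun a b => sepKey a ≤ sepKey b) :=
    PySem.List.sorted_pairwise xs sepKey
  set L := PySem.List.sorted xs sepKey with hL
  set D := PySem.List.dedup (xs.map keyF) with hDdef
  set DL := PySem.List.dedup (L.map keyF) with hDLdef
  have hperm : DL.Perm D := by
    rw [List.perm_ext_iff_of_nodup (PySem.List.nodup_dedup _) (PySem.List.nodup_dedup _)]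
    intro k
    simp only [PySem.List.mem_dedup]
    exact (hLperm.map keyF).mem_iff
  have hDLlt : DL.Pairwise (fun a b => toLex a < toLex b) := by
    have hle : DL.Pairwise (fun a b => toLex a ≤ toLex b) :=
      ((List.pairwise_map).mpr (hLpair.imp keyOf_mono)).sublist (dedup_sublist _)
    have hnd : DL.Nodup := PySem.List.nodup_dedup _
    exact (hle.and hnd).imp (fun h => lt_of_le_of_ne h.1 (fun he => h.2 (toLex.injective he)))
  have hdict : xs.foldl bGroupStep PySem.Dict.empty
      = PySem.Dict.mk (D.map (fun k => (k, pairsIn xs k))) := by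
    cases h : xs.foldl bGroupStep PySem.Dict.empty with
    | mk items => rw [show items = (xs.foldl bGroupStep PySem.Dict.empty).items by rw [h], groups_items]
  have hkeys : (xs.foldl bGroupStep PySem.Dict.empty).keys = D := by
    rw [hdict]
    simp [PySem.Dict.keys, List.map_map, Function.comp_def]
  have hsorted : PySem.List.sorted2 D (fun k => k.1) (fun k => k.2) = DL := by
    rw [sorted2_lex]
    exact PySem.List.sorted_eq_of_perm_of_pairwise_lt D DL (fun k => toLex k) hperm hDLlt
  have hstart : mergeFileSeparators_py_alt xs
      = (PySem.List.sorted2 (xs.foldl bGroupStep PySem.Dict.empty).keys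
          (fun k => k.1) (fun k => k.2)).foldl
          (fun acc k => acc ++ [bRow (xs.foldl bGroupStep PySem.Dict.empty) k]) [] := rfl
  rw [hstart, hkeys, hsorted, PySem.List.foldl_append_singleton_eq_map, List.nil_append]
  unfold canon
  rw [← hDLdef]
  apply List.map_congr_left
  intro k hk
  have hkD : k ∈ D := hperm.subset hk
  have hgetD : (xs.foldl bGroupStep PySem.Dict.empty).getD k [] = pairsIn xs k := by
    rw [hdict]
    exact assoc_getD D _ k [] hkD
  have hpairsperm : (pairsIn xs k).Perm (pairsIn L k) :=
    ((hLperm.filter _).map _).symm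
  have hpairsort : (pairsIn L k).Pairwise (fun p q => toLex p ≤ toLex q) := by
    unfold pairsIn
    rw [List.pairwise_map]
    refine List.Pairwise.imp_of_mem ?_ (hLpair.filter _)
    intro a b ha hb hab
    have hka : keyF a = k := by simpa using (List.mem_filter.mp ha).2
    have hkb : keyF b = k := by simpa using (List.mem_filter.mp hb).2
    exact pair_le hab (hka.trans hkb.symm)
  have hbrow : bRow (xs.foldl bGroupStep PySem.Dict.empty) k
      = (k.1, k.2,
        (match PySem.List.max2? (((xs.foldl bGroupStep PySem.Dict.empty).getD k []).filter
            (fun p => decide (p.1 ≠ -2))) (fun p => p.1) (fun p => p.2) with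
          | some q => q.1
          | none => -2),
        (match PySem.List.max2? (((xs.foldl bGroupStep PySem.Dict.empty).getD k []).filter
            (fun p => decide (p.2 ≠ -2))) (fun p => p.1) (fun p => p.2) with
          | some q => q.2
          | none => -2)) := rfl
  rw [hbrow, hgetD,
    max2_eq_getLast _ (((pairsIn L k)).filter (fun p => decide (p.1 ≠ -2)))
      (hpairsperm.filter _) (hpairsort.filter _),
    max2_eq_getLast _ (((pairsIn L k)).filter (fun p => decide (p.2 ≠ -2)))
      (hpairsperm.filter _) (hpairsort.filter _)]
  rfl

-- ===== VERDICT (by name: the statement is the Claim_ definition above) =====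
theorem mergeFileSeparators_py_spec : Claim_equal_mergeFileSeparators_py := by
  intro xs _
  unfold Spec_mergeFileSeparators_py mergeFileSeparators_py
  have h := loop_eq (PySem.List.sorted xs sepKey) [] (by simp) (by simp)
    (PySem.List.sorted_pairwise xs sepKey)
  rw [alt_canon xs, ← fold_canon _ (PySem.List.sorted_pairwise xs sepKey), ← h]
  simp [PySem.Dict.empty]
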